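-- pv_equiv track=rewrite | github.com/yxxcrtd/jitar2012 | WebContent/WEB-INF/jython/base_action.py | convertRoundMinNumber
-- ===== SOURCE A (Python) =====
-- def convertRoundMinNumber(intV):
--   if intV == None:
--     return 0
--   strV = str(intV)
--   if strV.isdigit() == False:
--     return 0
--   intStrLen = len(strV)
--   if intStrLen < 2:
--     return intV
--   strPad = "0"
--   for i in range(2, intStrLen):
--     strPad = strPad + "0"
--
--   strV = strV[0:1] + strPad
--   return int(strV)
-- ===== SOURCE B (Python) =====
-- def convertRoundMinNumber(intV):
--     if intV is None or intV < 0: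
--         return 0
--     k = 0
--     while 10 ** (k + 1) <= intV:
--         k += 1
--     p = 10 ** k
--     return intV // p * p
-- ===== Notes on version B (the rewrite author's own statement) =====
-- stated objective: alternative
-- what changed: Replaces the string round-trip (str(), isdigit, zero-padding loop, slicing, int()) by pure integer arithmetic: find the largest power of ten not exceeding the value and truncate with floor division.
import Mathlib
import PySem

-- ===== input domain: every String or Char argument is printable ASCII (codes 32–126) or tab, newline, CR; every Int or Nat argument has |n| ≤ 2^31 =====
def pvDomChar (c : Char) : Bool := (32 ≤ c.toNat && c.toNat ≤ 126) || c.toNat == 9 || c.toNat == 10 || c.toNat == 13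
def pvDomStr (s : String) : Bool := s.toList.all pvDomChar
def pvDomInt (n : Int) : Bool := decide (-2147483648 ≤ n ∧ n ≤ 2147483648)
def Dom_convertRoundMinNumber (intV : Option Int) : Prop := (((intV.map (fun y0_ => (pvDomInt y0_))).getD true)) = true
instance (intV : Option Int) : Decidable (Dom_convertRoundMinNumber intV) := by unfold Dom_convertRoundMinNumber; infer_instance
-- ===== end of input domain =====

-- B replaces the string round-trip (str/isdigit/zero-pad/slice/int) by pure integer
-- arithmetic: largest power of ten ≤ value, then truncating floor division (objective: alternative).

-- ===== PORT A =====
def convertRoundMinNumber (intV : Option Int) : Int :=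
  match intV with
  | none => 0                                   -- if intV == None: return 0
  | some v =>
    let strV := PySem.Int.toStr v               -- strV = str(intV)
    if PySem.Str.strIsdigit strV = false then 0 -- if strV.isdigit() == False: return 0
    else
      let intStrLen := PySem.Str.len strV       -- intStrLen = len(strV)
      if intStrLen < 2 then v                   -- if intStrLen < 2: return intV
      else
        -- strPad = "0"; for i in range(2, intStrLen): strPad = strPad + "0"
        let strPad := (PySem.List.pyRange 2 intStrLen 1).foldl (fun acc _ => acc ++ "0") "0"
        let strV2 := PySem.Str.slice strV (some 0) (some 1) ++ strPad   -- strV[0:1] + strPad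
        -- int(strV2): always a digit followed by zeros here, so it never raises;
        -- the getD 0 default is unreachable (exact port of int())
        (PySem.Int.ofStr? strV2).getD 0

-- ===== PORT B =====
-- while 10 ** (k + 1) <= intV: k += 1   (k only grows while 10^(k+1) ≤ v, so v.toNat - k shrinks)
def pvFindK (v : Int) (k : Nat) : Nat :=
  if (10 : Int) ^ (k + 1) ≤ v then pvFindK v (k + 1) else k
termination_by v.toNat - k
decreasing_by
  rename_i h
  have h1 : ((k : Int)) < 10 ^ (k + 1) := by
    have := Nat.lt_pow_self (a := 10) (n := k + 1) (by norm_num)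
    calc ((k : Int)) < ((k + 1 : Nat) : Int) := by exact_mod_cast Nat.lt_succ_self k
    _ ≤ ((10 ^ (k + 1) : Nat) : Int) := by exact_mod_cast this.le
    _ = 10 ^ (k + 1) := by push_cast; ring
  have h2 : (k : Int) < v := lt_of_lt_of_le h1 h
  omega

def convertRoundMinNumber_alt (intV : Option Int) : Int :=
  match intV with
  | none => 0                                   -- if intV is None ... return 0
  | some v =>
    if v < 0 then 0                             -- ... or intV < 0: return 0
    else
      let k := pvFindK v 0
      let p : Int := 10 ^ k                     -- p = 10 ** k
      PySem.Int.floordiv v p * p                -- return intV // p * p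

-- ===== PRECONDITION & SPEC =====
def Spec_convertRoundMinNumber (intV : Option Int) (out : Int) : Prop := out = convertRoundMinNumber_alt intV
instance (intV : Option Int) (out : Int) : Decidable (Spec_convertRoundMinNumber intV out) := by unfold Spec_convertRoundMinNumber; infer_instance

-- ===== CLAIM (what is proved, stated in full; the proofs are below) =====
def Claim_equal_convertRoundMinNumber : Prop := ∀ (intV : Option Int), Dom_convertRoundMinNumber intV → Spec_convertRoundMinNumber intV (convertRoundMinNumber intV)

-- ===== LEMMAS AND PROOFS =====

-- A structured clone of Nat.toDigits 10 for reasoning.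
def pvTD (m : Nat) : List Char :=
  if h : m < 10 then [Nat.digitChar m]
  else pvTD (m / 10) ++ [Nat.digitChar (m % 10)]
termination_by m
decreasing_by exact Nat.div_lt_self (by omega) (by omega)

theorem pvToDigitsCore_eq (f : Nat) : ∀ (n : Nat) (l : List Char), n < f →
    Nat.toDigitsCore 10 f n l = pvTD n ++ l := by
  induction f with
  | zero => intro n l h; omega
  | succ f ih =>
    intro n l h
    rw [Nat.toDigitsCore]
    by_cases h10 : n < 10
    · have : n / 10 = 0 := Nat.div_eq_of_lt h10
      simp [this, pvTD, h10, Nat.mod_eq_of_lt h10]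
    · have hne : ¬ n / 10 = 0 := by omega
      rw [if_neg hne]
      rw [ih (n / 10) _ (by have := Nat.div_lt_self (by omega : 0 < n) (by omega : 1 < 10); omega)]
      conv_rhs => rw [pvTD]
      rw [dif_neg h10, List.append_assoc]
      rfl

theorem pvToDigits_eq (m : Nat) : Nat.toDigits 10 m = pvTD m := by
  rw [Nat.toDigits, pvToDigitsCore_eq (m + 1) m [] (Nat.lt_succ_self m), List.append_nil]

theorem pvDigitChar_isdigit {d : Nat} (h : d < 10) : PySem.Chars.isdigit (Nat.digitChar d) = true := by
  interval_cases d <;> decide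

theorem pvDigitChar_toNat {d : Nat} (h : d < 10) : (Nat.digitChar d).toNat = 48 + d := by
  interval_cases d <;> decide

theorem pvTD_all_digit (m : Nat) : ∀ c ∈ pvTD m, PySem.Chars.isdigit c = true := by
  induction m using pvTD.induct with
  | case1 m h => rw [pvTD]; simp [h, pvDigitChar_isdigit h]
  | case2 m h ih =>
    rw [pvTD, dif_neg h]
    intro c hc
    rcases List.mem_append.1 hc with h1 | h1
    · exact ih c h1
    · simp at h1; subst h1; exact pvDigitChar_isdigit (Nat.mod_lt m (by omega))

theorem pvTD_ne_nil (m : Nat) : pvTD m ≠ [] := by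
  rw [pvTD]; split <;> simp

-- decimal value of a digit list
def pvVal (cs : List Char) : Nat := cs.foldl (fun a c => 10 * a + (c.toNat - 48)) 0

theorem pvVal_acc (cs : List Char) : ∀ a, cs.foldl (fun a c => 10 * a + (c.toNat - 48)) a
    = a * 10 ^ cs.length + pvVal cs := by
  induction cs with
  | nil => intro a; simp [pvVal]
  | cons c cs ih =>
    intro a
    simp only [List.foldl_cons, List.length_cons, pvVal]
    rw [ih, ih (10 * 0 + (c.toNat - 48))]
    ring

theorem pvVal_cons (c : Char) (cs : List Char) :
    pvVal (c :: cs) = (c.toNat - 48) * 10 ^ cs.length + pvVal cs := by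
  simp only [pvVal, List.foldl_cons]
  rw [pvVal_acc]; simp [pvVal]

theorem pvVal_lt (cs : List Char) (h : ∀ c ∈ cs, PySem.Chars.isdigit c = true) :
    pvVal cs < 10 ^ cs.length := by
  induction cs with
  | nil => simp [pvVal]
  | cons c cs ih =>
    rw [pvVal_cons]
    have hc := h c (by simp)
    have hd : c.toNat - 48 ≤ 9 := by
      simp [PySem.Chars.isdigit, Char.le_def, UInt32.le_iff_toNat_le] at hc
      have : c.toNat ≤ 57 := hc.2
      omega
    have := ih (fun x hx => h x (by simp [hx]))
    have h1 : (c.toNat - 48) * 10 ^ cs.length ≤ 9 * 10 ^ cs.length :=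
      Nat.mul_le_mul_right _ hd
    simp only [List.length_cons, pow_succ]
    omega

theorem pvTD_val (m : Nat) : pvVal (pvTD m) = m := by
  induction m using pvTD.induct with
  | case1 m h => rw [pvTD]; simp [h, pvVal, pvDigitChar_toNat h]
  | case2 m h ih =>
    rw [pvTD, dif_neg h]
    simp only [pvVal, List.foldl_append, List.foldl_cons, List.foldl_nil]
    have : (pvTD (m / 10)).foldl (fun a c => 10 * a + (c.toNat - 48)) 0 = m / 10 := ih
    rw [this, pvDigitChar_toNat (Nat.mod_lt m (by omega))]
    omega

theorem pvTD_bounds (m : Nat) (hm : 1 ≤ m) :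
    10 ^ ((pvTD m).length - 1) ≤ m ∧ m < 10 ^ (pvTD m).length := by
  induction m using pvTD.induct with
  | case1 m h => rw [pvTD]; simp [h]; omega
  | case2 m h ih =>
    rw [pvTD, dif_neg h]
    simp only [List.length_append, List.length_cons, List.length_nil]
    have hd : 1 ≤ m / 10 := by omega
    obtain ⟨lo, hi⟩ := ih hd
    have hne : 1 ≤ (pvTD (m / 10)).length := List.length_pos_of_ne_nil (pvTD_ne_nil (m / 10))
    constructor
    · have : 10 ^ ((pvTD (m / 10)).length - 1 + 1) ≤ (m / 10) * 10 := by
        rw [pow_succ]; exact Nat.mul_le_mul_right _ lo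
      calc 10 ^ ((pvTD (m / 10)).length + 0 + 1 - 1) = 10 ^ ((pvTD (m / 10)).length - 1 + 1) := by
            congr 1; omega
        _ ≤ (m / 10) * 10 := this
        _ ≤ m := by omega
    · have : m < (m / 10 + 1) * 10 := by omega
      calc m < (m / 10 + 1) * 10 := this
        _ ≤ 10 ^ (pvTD (m / 10)).length * 10 := Nat.mul_le_mul_right _ (by omega)
        _ = 10 ^ ((pvTD (m / 10)).length + 0 + 1) := by rw [pow_succ]

theorem pvFindK_spec (L : Nat) (m : Nat) (hlo : 10 ^ L ≤ m) (hhi : m < 10 ^ (L + 1)) :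
    ∀ j, j ≤ L → pvFindK (m : Int) j = L := by
  suffices h : ∀ d j, L - j = d → j ≤ L → pvFindK (m : Int) j = L by
    intro j hj; exact h (L - j) j rfl hj
  intro d
  induction d with
  | zero =>
    intro j hd hj
    have hjL : j = L := by omega
    rw [pvFindK]
    have hx : ¬ ((10 : Int) ^ (j + 1) ≤ (m : Int)) := by
      rw [hjL]; exact_mod_cast not_le.2 (by exact_mod_cast hhi)
    rw [if_neg hx, hjL]
  | succ d ih =>
    intro j hd hj
    rw [pvFindK]
    have hjl : j < L := by omega
    have : (10 : Int) ^ (j + 1) ≤ (m : Int) := by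
      have : (10 : Nat) ^ (j + 1) ≤ 10 ^ L := Nat.pow_le_pow_right (by omega) (by omega)
      exact_mod_cast le_trans this hlo
    simp only [this, if_true]
    exact ih (j + 1) (by omega) (by omega)

-- the padding loop builds exactly len-1 zeros (as a string)
theorem pvPad_toList (xs : List Int) (s : String) :
    (xs.foldl (fun acc _ => acc ++ "0") s).toList = s.toList ++ List.replicate xs.length '0' := by
  induction xs generalizing s with
  | nil => simp
  | cons x xs ih =>
    simp only [List.foldl_cons, List.length_cons, ih]
    have : (s ++ "0").toList = s.toList ++ ['0'] := by
      simp
    rw [this]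
    simp [List.replicate_succ]

theorem pvOfChars_digit_zeros (c : Char) (hc : PySem.Chars.isdigit c = true) (k : Nat) (hk : k ≤ 9) :
    PySem.Int.ofChars? (c :: List.replicate k '0') = some (((c.toNat - 48 : Nat) : Int) * 10 ^ k) := by
  have hmem : c ∈ ['0','1','2','3','4','5','6','7','8','9'] := by
    simp only [PySem.Chars.isdigit, Bool.and_eq_true, decide_eq_true_eq] at hc
    obtain ⟨h1, h2⟩ := hc
    rw [Char.le_def, UInt32.le_iff_toNat_le] at h1 h2
    have hb1 : 48 ≤ c.toNat := h1
    have hb2 : c.toNat ≤ 57 := h2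
    have h0 : c = Char.ofNat c.toNat := (Char.ofNat_toNat c).symm
    interval_cases h : c.toNat <;> rw [h0] <;> decide
  fin_cases hmem <;> interval_cases k <;> decide

theorem pvFloordiv_cast (m k : Nat) :
    PySem.Int.floordiv ((m : Nat) : Int) ((10:Int) ^ k) = ((m / 10 ^ k : Nat) : Int) := by
  unfold PySem.Int.floordiv
  rw [Int.fdiv_eq_ediv, if_pos (Or.inl (by positivity))]
  rw [show ((10:Int) ^ k) = ((10 ^ k : Nat) : Int) by push_cast; ring]
  rw [Int.ofNat_ediv_ofNat]
  ring

-- ===== VERDICT (by name: the statement is the Claim_ definition above) =====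
set_option maxHeartbeats 1000000 in
theorem convertRoundMinNumber_spec : Claim_equal_convertRoundMinNumber := by
  intro intV hdom
  unfold Spec_convertRoundMinNumber convertRoundMinNumber convertRoundMinNumber_alt
  match intV with
  | none => rfl
  | some v =>
    have hdomv : v ≤ 2147483648 := by
      simp only [Dom_convertRoundMinNumber, Option.map_some, Option.getD_some, pvDomInt,
        decide_eq_true_eq] at hdom
      exact hdom.2
    by_cases hneg : v < 0
    · -- str(v) starts with '-': isdigit is False, both return 0
      have hdig : PySem.Str.strIsdigit (PySem.Int.toStr v) = false := by
        rw [PySem.Str.strIsdigit_eq, PySem.Int.toList_toStr, PySem.Int.toChars, if_pos hneg]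
        simp only [PySem.Chars.strIsdigit, List.all_cons]
        simp [show PySem.Chars.isdigit '-' = false from rfl]
      simp only [hdig, if_pos, hneg, if_true]
    · push_neg at hneg
      have hv : v = ((v.toNat : Nat) : Int) := by omega
      set m := v.toNat with hm
      have htl : (PySem.Int.toStr v).toList = pvTD m := by
        rw [PySem.Int.toList_toStr, PySem.Int.toChars, if_neg (not_lt.2 hneg), pvToDigits_eq]
      have hdig : PySem.Str.strIsdigit (PySem.Int.toStr v) = true := by
        rw [PySem.Str.strIsdigit_eq, htl]
        have h1 : (pvTD m).isEmpty = false := by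
          simp [List.isEmpty_iff, pvTD_ne_nil m]
        simp [PySem.Chars.strIsdigit, h1, List.all_eq_true]
        exact pvTD_all_digit m
      have hlen : PySem.Str.len (PySem.Int.toStr v) = ((pvTD m).length : Int) := by
        simp [PySem.Str.len, htl]
      simp only [hdig, Bool.true_eq_false, if_false, hlen]
      by_cases hsmall : m < 10
      · -- one digit: A returns v unchanged, B divides by 10^0 = 1
        have hlen1 : (pvTD m).length = 1 := by rw [pvTD, dif_pos hsmall]; rfl
        have hk0 : pvFindK v 0 = 0 := by
          rw [pvFindK]
          have : ¬ ((10 : Int) ^ (0 + 1) ≤ v) := by omega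
          rw [if_neg this]
        rw [hlen1]
        rw [if_pos (by norm_num : ((1:Nat) : Int) < 2)]
        rw [if_neg hneg.not_gt]
        have h1 : PySem.Int.floordiv v 1 = v := Int.fdiv_one v
        simp only [hk0, pow_zero]
        rw [h1, mul_one]
      · -- at least two digits
        push_neg at hsmall
        obtain ⟨hlo, hhi⟩ := pvTD_bounds m (by omega)
        set L := (pvTD m).length with hL
        have hL2 : 2 ≤ L := by
          by_contra hc
          push_neg at hc
          interval_cases L
          · simp at hhi; omega
          · simp at hhi; omega
        have hLle : L - 1 ≤ 9 := by
          by_contra hc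
          push_neg at hc
          have : (10:Nat) ^ 10 ≤ 10 ^ (L - 1) := Nat.pow_le_pow_right (by omega) (by omega)
          have : (10:Nat) ^ 10 ≤ m := le_trans this hlo
          have hmle : m ≤ 2147483648 := by omega
          norm_num at this
          omega
        have hnotlt : ¬ ((L : Int) < 2) := by omega
        rw [if_neg hnotlt]
        -- the padded string
        obtain ⟨c, rest, hcr⟩ : ∃ c rest, pvTD m = c :: rest := by
          cases hx : pvTD m with
          | nil => exact absurd hx (pvTD_ne_nil m)
          | cons a l => exact ⟨a, l, rfl⟩
        have hrest : rest.length = L - 1 := by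
          have : (pvTD m).length = rest.length + 1 := by rw [hcr]; simp
          omega
        have hrange : (PySem.List.pyRange 2 (L : Int) 1).length = L - 2 := by
          simp only [PySem.List.pyRange]
          rw [if_neg (by norm_num : (1:Int) ≠ 0), if_pos (by norm_num : (0:Int) < 1)]
          by_cases hL3 : (2:Int) < (L:Int)
          · rw [if_pos hL3]
            simp only [List.length_map, List.length_range]
            have h4 : ((L : Int) - 2 + 1 - 1) / 1 = (L : Int) - 2 := by omega
            rw [h4]
            omega
          · rw [if_neg hL3]
            simp only [List.length_map, List.length_range]
            omega
        have hpad : ((PySem.List.pyRange 2 (L : Int) 1).foldl (fun acc _ => acc ++ "0") "0").toList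
            = List.replicate (L - 1) '0' := by
          rw [pvPad_toList, hrange]
          have : "0".toList = ['0'] := rfl
          rw [this, List.singleton_append, ← List.replicate_succ]
          congr 1
          omega
        have hslice : (PySem.Str.slice (PySem.Int.toStr v) (some 0) (some 1)).toList = [c] := by
          rw [PySem.Str.toList_slice, htl, hcr]
          simp [PySem.Chars.slice, PySem.List.slice_to]
        have hcat : (PySem.Str.slice (PySem.Int.toStr v) (some 0) (some 1) ++
            (PySem.List.pyRange 2 (L : Int) 1).foldl (fun acc _ => acc ++ "0") "0").toList
            = c :: List.replicate (L - 1) '0' := by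
          rw [String.toList_append, hslice, hpad]
          rfl
        have hcdig : PySem.Chars.isdigit c = true := pvTD_all_digit m c (by rw [hcr]; simp)
        have hparse : PySem.Int.ofStr? (PySem.Str.slice (PySem.Int.toStr v) (some 0) (some 1) ++
            (PySem.List.pyRange 2 (L : Int) 1).foldl (fun acc _ => acc ++ "0") "0")
            = some (((c.toNat - 48 : Nat) : Int) * 10 ^ (L - 1)) := by
          rw [PySem.Int.ofStr?, hcat]
          exact pvOfChars_digit_zeros c hcdig (L - 1) hLle
        -- leading digit = m / 10^(L-1)
        have hval : (c.toNat - 48) * 10 ^ (L - 1) + pvVal rest = m := by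
          have := pvTD_val m
          rw [hcr, pvVal_cons, hrest] at this
          exact this
        have hrlt : pvVal rest < 10 ^ (L - 1) := by
          have := pvVal_lt rest (fun x hx => pvTD_all_digit m x (by rw [hcr]; simp [hx]))
          rwa [hrest] at this
        have hdiv : m / 10 ^ (L - 1) = c.toNat - 48 := by
          rw [← hval]
          have hcomm : (c.toNat - 48) * 10 ^ (L - 1) + pvVal rest
              = pvVal rest + 10 ^ (L - 1) * (c.toNat - 48) := by ring
          rw [hcomm, Nat.add_mul_div_left _ _ (by positivity : 0 < 10 ^ (L - 1)),
            Nat.div_eq_of_lt hrlt, zero_add]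
        -- B side
        have hkL : pvFindK v 0 = L - 1 := by
          rw [hv]
          exact pvFindK_spec (L - 1) m hlo (by
            have : L - 1 + 1 = L := by omega
            rw [this]; exact hhi) 0 (by omega)
        have hfd : PySem.Int.floordiv v ((10:Int) ^ (L - 1)) = ((m / 10 ^ (L - 1) : Nat) : Int) := by
          rw [hv]
          exact pvFloordiv_cast m (L - 1)
        rw [if_neg hneg.not_gt]
        simp only [hparse, Option.getD_some, hkL]
        rw [hfd, hdiv]
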